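-- pv_equiv track=rewrite | github.com/ConnorForr/aoc2023 | Day 3/day3_part2.py | right_row_check
-- ===== SOURCE A (Python) =====
-- def right_row_check(right_row):
--     number = ""
--     total_parts = 0
--     part_numbers = []
--     for index, value in enumerate(right_row):
--
--         if value.isdigit() and index == 0:
--             number += value
--             total_parts += 1
--
--         elif value.isdigit():
--             number += value
--
--         elif total_parts == 1 and number != "":
--             part_numbers.append(int(number))
--             number = ""
--
--     if total_parts == 1 and number != "":
--         part_numbers.append(int(number))
--
--     return total_parts, part_numbers
-- ===== SOURCE B (Python) =====
-- def right_row_check(right_row):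
--     # Guard: a row only "counts" (total_parts == 1) when its first char is a digit;
--     # otherwise A collects nothing.  Then extract maximal digit runs by index scanning.
--     if not right_row or not right_row[0].isdigit():
--         return 0, []
--     part_numbers = []
--     i, n = 0, len(right_row)
--     while i < n:
--         if right_row[i].isdigit():
--             j = i
--             while j < n and right_row[j].isdigit():
--                 j += 1
--             part_numbers.append(int(right_row[i:j]))
--             i = j
--         else:
--             i += 1
--     return 1, part_numbers
-- ===== Notes on version B (the rewrite author's own statement) =====
-- stated objective: simpler
-- what changed: Replaces A's char-by-char state machine (accumulator string, total_parts counter, reset-and-flush branches, trailing flush after the loop) by an up-front first-char guard plus direct extraction of maximal digit runs with a two-index scan and slice-to-int conversion.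
import Mathlib
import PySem

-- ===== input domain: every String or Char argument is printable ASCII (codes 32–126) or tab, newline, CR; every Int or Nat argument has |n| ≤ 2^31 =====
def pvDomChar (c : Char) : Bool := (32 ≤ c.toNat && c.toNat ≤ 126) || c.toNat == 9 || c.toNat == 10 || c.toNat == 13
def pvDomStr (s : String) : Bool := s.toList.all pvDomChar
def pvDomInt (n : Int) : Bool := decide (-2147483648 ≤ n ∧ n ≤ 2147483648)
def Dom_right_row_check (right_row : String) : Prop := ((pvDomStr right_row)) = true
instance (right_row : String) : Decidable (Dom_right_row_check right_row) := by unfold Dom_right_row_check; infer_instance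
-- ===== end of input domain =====

-- B replaces A's accumulate/reset state machine by a first-char guard plus direct
-- extraction of maximal digit runs (objective: simpler; same O(n) cost).

-- ===== PORT A =====
-- int(number): wherever A calls it, number is a nonempty run of ASCII digits, so int() succeeds
def pvToInt (number : List Char) : Int :=
  (PySem.Int.ofChars? number).getD 0

/-- the `for index, value in enumerate(right_row)` loop, state = (number, total_parts, part_numbers) -/
def pvLoopA : List Char → Int → List Char × Int × List Int → List Char × Int × List Int
  | [], _, st => st
  | value :: rest, index, (number, total_parts, part_numbers) =>
    if PySem.Chars.isdigit value && (index == 0) then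
      pvLoopA rest (index + 1) (number ++ [value], total_parts + 1, part_numbers)
    else if PySem.Chars.isdigit value then
      pvLoopA rest (index + 1) (number ++ [value], total_parts, part_numbers)
    else if (total_parts == 1) && (number != []) then
      pvLoopA rest (index + 1) ([], total_parts, part_numbers ++ [pvToInt number])
    else
      pvLoopA rest (index + 1) (number, total_parts, part_numbers)

/-- the trailing `if total_parts == 1 and number != "":` flush and the return -/
def pvFinishA (st : List Char × Int × List Int) : Int × List Int :=
  (st.2.1, if (st.2.1 == 1) && (st.1 != []) then st.2.2 ++ [pvToInt st.1] else st.2.2)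

def right_row_check (right_row : String) : Int × List Int :=
  pvFinishA (pvLoopA right_row.toList 0 ([], 0, []))

-- ===== PORT B =====
/-- the outer while loop of B: skip non-digits, slice off a maximal digit run (inner while = takeWhile/dropWhile) -/
def pvRuns : List Char → List Int
  | [] => []
  | c :: cs =>
    if h : PySem.Chars.isdigit c then
      pvToInt ((c :: cs).takeWhile PySem.Chars.isdigit) ::
        pvRuns ((c :: cs).dropWhile PySem.Chars.isdigit)
    else
      pvRuns cs
termination_by cs => cs.length
decreasing_by
  · simp [List.dropWhile, h]
    exact List.length_dropWhile_le _ _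
  · simp

def right_row_check_alt (right_row : String) : Int × List Int :=
  match right_row.toList with
  | [] => (0, [])
  | c :: cs => if PySem.Chars.isdigit c then (1, pvRuns (c :: cs)) else (0, [])

-- ===== PRECONDITION & SPEC =====
def Spec_right_row_check (right_row : String) (out : Int × List Int) : Prop := out = right_row_check_alt right_row
instance (right_row : String) (out : Int × List Int) : Decidable (Spec_right_row_check right_row out) := by unfold Spec_right_row_check; infer_instance

-- ===== CLAIM (what is proved, stated in full; the proofs are below) =====
def Claim_equal_right_row_check : Prop := ∀ (right_row : String), Dom_right_row_check right_row → Spec_right_row_check right_row (right_row_check right_row)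

-- ===== LEMMAS AND PROOFS =====

/-- A's loop state digested: `number` is the pending digit run, the run list still to come. -/
def pvG : List Char → List Char → List Int
  | num, [] => if num ≠ [] then [pvToInt num] else []
  | num, c :: cs =>
    if PySem.Chars.isdigit c then pvG (num ++ [c]) cs
    else (if num ≠ [] then [pvToInt num] else []) ++ pvG [] cs

/-- With total_parts = 0 and index ≥ 1, A's loop never changes total_parts or part_numbers. -/
theorem pvLoopA_zero (cs : List Char) : ∀ (k : Int), 1 ≤ k → ∀ (num : List Char) (pn : List Int),
    (pvLoopA cs k (num, 0, pn)).2 = (0, pn) := by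
  induction cs with
  | nil => intro k hk num pn; simp [pvLoopA]
  | cons c cs ih =>
    intro k hk num pn
    have hk0 : (k == 0) = false := by simp; omega
    by_cases h : PySem.Chars.isdigit c
    · simp [pvLoopA, h, hk0]; exact ih (k + 1) (by omega) _ _
    · simp [pvLoopA, h]; exact ih (k + 1) (by omega) _ _

/-- With total_parts = 1 and index ≥ 1, A's loop plus the trailing flush produces the runs `pvG num cs`. -/
theorem pvLoopA_one (cs : List Char) : ∀ (k : Int), 1 ≤ k → ∀ (num : List Char) (acc : List Int),
    pvFinishA (pvLoopA cs k (num, 1, acc)) = (1, acc ++ pvG num cs) := by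
  induction cs with
  | nil =>
    intro k hk num acc
    by_cases hn : num = [] <;> simp [pvLoopA, pvFinishA, pvG, hn]
  | cons c cs ih =>
    intro k hk num acc
    have hk0 : (k == 0) = false := by simp; omega
    by_cases h : PySem.Chars.isdigit c
    · simp [pvLoopA, h, hk0, pvG]; exact ih (k + 1) (by omega) _ _
    · by_cases hn : num = []
      · simp [pvLoopA, h, hn, pvG]; exact ih (k + 1) (by omega) _ _
      · simp [pvLoopA, h, hn, pvG]
        rw [ih (k + 1) (by omega) [] (acc ++ [pvToInt num])]
        simp
/-- pvG vs B's run extraction: pending nonempty run case, and empty-pending case. -/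
theorem pvG_spec (cs : List Char) :
    (∀ num, num ≠ [] → pvG num cs
        = pvToInt (num ++ cs.takeWhile PySem.Chars.isdigit) :: pvRuns (cs.dropWhile PySem.Chars.isdigit))
    ∧ pvG [] cs = pvRuns cs := by
  induction cs with
  | nil =>
    constructor
    · intro num hn; simp [pvG, hn, pvRuns]
    · simp [pvG, pvRuns]
  | cons c cs ih =>
    obtain ⟨ih1, ih2⟩ := ih
    by_cases h : PySem.Chars.isdigit c
    · constructor
      · intro num hn
        rw [pvG, if_pos h, ih1 (num ++ [c]) (by simp)]
        simp [List.takeWhile, List.dropWhile, h]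
      · rw [pvG, if_pos h]
        simp only [List.nil_append]
        rw [ih1 [c] (by simp), pvRuns]
        simp [List.takeWhile, List.dropWhile, h]
    · constructor
      · intro num hn
        rw [pvG, if_neg h]
        simp only [List.takeWhile, List.dropWhile, h]
        rw [ih2, pvRuns, dif_neg h]
        simp [hn]
      · rw [pvG, if_neg h, pvRuns, dif_neg h]
        simp [ih2]

-- ===== VERDICT (by name: the statement is the Claim_ definition above) =====
theorem right_row_check_spec : Claim_equal_right_row_check := by
  intro s _
  unfold Spec_right_row_check right_row_check
  cases hs : s.toList with
  | nil => simp [right_row_check_alt, hs, pvLoopA, pvFinishA]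
  | cons c cs =>
    rw [show right_row_check_alt s = (if PySem.Chars.isdigit c then (1, pvRuns (c :: cs)) else (0, [])) from by rw [right_row_check_alt, hs]]
    by_cases h : PySem.Chars.isdigit c
    · rw [if_pos h]
      have h1 : pvLoopA (c :: cs) 0 ([], 0, []) = pvLoopA cs 1 ([c], 1, []) := by
        simp [pvLoopA, h]
      rw [h1, pvLoopA_one cs 1 le_rfl [c] []]
      rw [(pvG_spec cs).1 [c] (by simp), pvRuns, dif_pos h]
      simp [List.takeWhile, List.dropWhile, h]
    · rw [if_neg h]
      have h1 : pvLoopA (c :: cs) 0 ([], 0, []) = pvLoopA cs 1 ([], 0, []) := by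
        simp [pvLoopA, h]
      have h2 := pvLoopA_zero cs 1 le_rfl [] []
      rw [h1] at *
      unfold pvFinishA
      rw [h2]
      simp
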